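-- pv_equiv track=rewrite | github.com/CosmicPegasus07/testrepo | prgm1.py | disarium
-- ===== SOURCE A (Python) =====
-- def disarium(num):
--     numb = str(num)
--     length = len(numb)
--     result = rem = 0
--     while num>0:
--         rem  = num % 10
--         result = result + (rem ** length)
--         length = length -1
--         num = num // 10
--     return result
-- ===== SOURCE B (Python) =====
-- def disarium(num):
--     if num <= 0:
--         return 0
--     total = 0
--     for i, c in enumerate(str(num)):
--         total += int(c) ** (i + 1)
--     return total
-- ===== Notes on version B (the rewrite author's own statement) =====
-- stated objective: simpler
-- what changed: B replaces A's right-to-left arithmetic digit extraction (%10 and //10 with a down-counting exponent) by a single left-to-right enumerate over str(num), raising each digit to its 1-based position, with an early return 0 for non-positive input.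
import Mathlib
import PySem

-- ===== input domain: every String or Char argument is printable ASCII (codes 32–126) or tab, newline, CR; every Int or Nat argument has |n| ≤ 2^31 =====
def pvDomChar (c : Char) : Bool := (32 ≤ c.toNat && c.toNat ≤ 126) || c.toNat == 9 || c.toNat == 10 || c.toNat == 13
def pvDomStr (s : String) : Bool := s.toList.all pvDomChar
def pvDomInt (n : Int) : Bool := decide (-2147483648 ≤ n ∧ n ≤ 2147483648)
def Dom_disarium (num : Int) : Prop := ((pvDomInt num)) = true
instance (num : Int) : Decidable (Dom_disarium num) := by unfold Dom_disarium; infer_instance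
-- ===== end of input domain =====

-- B iterates the digits of str(num) left-to-right with their 1-based positions instead of
-- A's right-to-left %10 / //10 extraction with a down-counting exponent (objective: simpler).

-- ===== PORT A =====
-- the while loop of A; `rem ** length` is ported as `^ length.toNat` (in every iteration the
-- loop reaches, length ≥ 1, so this is exact)
def disariumLoop (num length result : Int) : Int :=
  if _h : 0 < num then
    disariumLoop (PySem.Int.floordiv num 10) (length - 1)
      (result + (PySem.Int.mod num 10) ^ length.toNat)
  else result
termination_by num.toNat
decreasing_by
  simp [PySem.Int.floordiv, Int.fdiv_eq_ediv]
  omega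

def disarium (num : Int) : Int :=
  let numb := PySem.Int.toStr num
  let length := PySem.Str.len numb
  disariumLoop num length 0

-- ===== PORT B =====
-- int(c) for a digit character c, exact on the digits produced by str of a positive int
def pvDigitVal (c : Char) : Int := (c.toNat : Int) - 48

def disarium_alt (num : Int) : Int :=
  if num ≤ 0 then 0
  else
    (PySem.List.enumerate (PySem.Int.toStr num).toList).foldl
      (fun total ic => total + pvDigitVal ic.2 ^ (ic.1 + 1).toNat) 0

-- ===== PRECONDITION & SPEC =====
def Spec_disarium (num : Int) (out : Int) : Prop := out = disarium_alt num
instance (num : Int) (out : Int) : Decidable (Spec_disarium num out) := by unfold Spec_disarium; infer_instance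

-- ===== CLAIM (what is proved, stated in full; the proofs are below) =====
def Claim_equal_disarium : Prop := ∀ (num : Int), Dom_disarium num → Spec_disarium num (disarium num)

-- ===== LEMMAS AND PROOFS =====

-- the digit-character list of a positive natural, built head-first
def myDigits (n : Nat) : List Char :=
  if _h : n < 10 then [Nat.digitChar n] else myDigits (n / 10) ++ [Nat.digitChar (n % 10)]
termination_by n
decreasing_by omega

theorem toDigitsCore_eq (f : Nat) : ∀ (n : Nat) (acc : List Char), n < f →
    Nat.toDigitsCore 10 f n acc = myDigits n ++ acc := by
  induction f with
  | zero => intro n acc h; omega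
  | succ f ih =>
    intro n acc h
    rw [Nat.toDigitsCore]
    by_cases h10 : n / 10 = 0
    · rw [h10]; simp only [if_true]
      rw [myDigits]
      have hn : n < 10 := by omega
      rw [dif_pos hn]
      have : n % 10 = n := Nat.mod_eq_of_lt hn
      rw [this]; rfl
    · rw [if_neg h10]
      rw [ih (n / 10) _ (by omega)]
      conv_rhs => rw [myDigits]
      rw [dif_neg (by omega : ¬ n < 10)]
      simp

theorem toDigits_eq (n : Nat) : Nat.toDigits 10 n = myDigits n :=
  (toDigitsCore_eq (n + 1) n [] (by omega)).trans (by simp)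

theorem pvDigitVal_digitChar (d : Nat) (h : d < 10) : pvDigitVal (Nat.digitChar d) = (d : Int) := by
  interval_cases d <;> decide

theorem enumerate_append_singleton {α : Type} (xs : List α) (c : α) : ∀ (s : Int),
    PySem.List.enumerate (xs ++ [c]) s
      = PySem.List.enumerate xs s ++ [(s + xs.length, c)] := by
  induction xs with
  | nil => intro s; simp [PySem.List.enumerate]
  | cons x t ih =>
    intro s
    have hsh : (s + 1) + (t.length : Int) = s + ((t.length + 1 : Nat) : Int) := by push_cast; ring
    simp [PySem.List.enumerate, ih (s + 1), hsh]

-- B's sum over a fixed char list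
def bSum (cs : List Char) : Int :=
  (PySem.List.enumerate cs).foldl (fun total ic => total + pvDigitVal ic.2 ^ (ic.1 + 1).toNat) 0

theorem bSum_append_singleton (xs : List Char) (c : Char) :
    bSum (xs ++ [c]) = bSum xs + pvDigitVal c ^ (xs.length + 1) := by
  unfold bSum
  rw [enumerate_append_singleton xs c 0, List.foldl_append]
  have hexp : ((0 + (xs.length : Int)) + 1).toNat = xs.length + 1 := by omega
  simp only [List.foldl_cons, List.foldl_nil, hexp]

-- the main loop invariant: A's loop on n with length = #digits of n adds bSum of the digits
theorem loop_eq (n : Nat) : ∀ (r : Int), 0 < n →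
    disariumLoop (n : Int) ((myDigits n).length : Int) r = r + bSum (myDigits n) := by
  induction n using Nat.strong_induction_on with
  | _ n ih =>
    intro r hn
    rw [disariumLoop.eq_def, dif_pos (by exact_mod_cast hn)]
    have hdiv : PySem.Int.floordiv (n : Int) 10 = ((n / 10 : Nat) : Int) := by
      simp [PySem.Int.floordiv, Int.fdiv_eq_ediv]
    have hmod : PySem.Int.mod (n : Int) 10 = ((n % 10 : Nat) : Int) := by
      simp [PySem.Int.mod, Int.fmod_eq_emod]
    by_cases h10 : n < 10
    · -- one digit: recursive call with num = 0 returns immediately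
      have hd : myDigits n = [Nat.digitChar n] := by rw [myDigits, dif_pos h10]
      have hmn : n % 10 = n := Nat.mod_eq_of_lt h10
      have hdn : n / 10 = 0 := Nat.div_eq_of_lt h10
      rw [hdiv, hmod, hdn, hd]
      rw [disariumLoop.eq_def]
      simp only [Nat.cast_zero, lt_self_iff_false, dite_false]
      have : bSum [Nat.digitChar n] = pvDigitVal (Nat.digitChar n) ^ 1 := by
        simp [bSum, PySem.List.enumerate]
      rw [this, pvDigitVal_digitChar n h10, hmn]
      simp
    · -- n ≥ 10: peel the last digit
      have hsplit : myDigits n = myDigits (n / 10) ++ [Nat.digitChar (n % 10)] := by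
        rw [myDigits, dif_neg h10]
      have hlen : (myDigits n).length = (myDigits (n / 10)).length + 1 := by
        rw [hsplit]; simp
      rw [hdiv, hmod]
      have hstep :
          ((myDigits n).length : Int) - 1 = ((myDigits (n / 10)).length : Int) := by
        rw [hlen]; push_cast; ring
      rw [hstep]
      rw [ih (n / 10) (by omega) _ (by omega)]
      rw [hsplit, bSum_append_singleton]
      rw [pvDigitVal_digitChar (n % 10) (by omega)]
      have hexp : ((myDigits (n / 10) ++ [(n % 10).digitChar]).length : Int).toNat
          = (myDigits (n / 10)).length + 1 := by simp
      rw [hexp]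
      ring

theorem disarium_eq_alt (num : Int) : disarium num = disarium_alt num := by
  by_cases h : num ≤ 0
  · -- the while loop never runs; B returns 0 directly
    unfold disarium disarium_alt
    rw [disariumLoop.eq_def]
    simp [h, not_lt.mpr h]
  · push_neg at h
    unfold disarium disarium_alt
    rw [if_neg (by omega)]
    have hchars : (PySem.Int.toStr num).toList = myDigits num.toNat := by
      rw [PySem.Int.toList_toStr, PySem.Int.toChars, if_neg (by omega), toDigits_eq]
    have hnum : ((num.toNat : Nat) : Int) = num := by omega
    simp only [PySem.Str.len, hchars]
    have := loop_eq num.toNat 0 (by omega)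
    rw [hnum] at this
    rw [this]
    simp [bSum]

-- ===== VERDICT (by name: the statement is the Claim_ definition above) =====
theorem disarium_spec : Claim_equal_disarium := by
  intro num _
  unfold Spec_disarium
  exact disarium_eq_alt num
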